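-- pv_equiv track=rewrite | github.com/bharadwaj92/hacker-rank | expressionparsing.py | reverse_expr
-- ===== SOURCE A (Python) =====
-- def reverse_expr(exp):
--     res =""
--     for i in reversed(exp):# Checking reversed expression
--         if(i == " "):
--             continue
--         if(i == ')'):# If open paran, replace by closed paran and vice versa
--             res = res+str('(')
--         elif(i=='('):
--             res = res+str(')')
--         else:
--             res = res+i
--     return res
-- ===== SOURCE B (Python) =====
-- def reverse_expr(exp):
--     if len(exp) == 0:
--         return ""
--     if len(exp) == 1:
--         if exp == ' ':
--             return ""
--         return {'(': ')', ')': '('}.get(exp, exp)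
--     mid = len(exp) // 2
--     return reverse_expr(exp[mid:]) + reverse_expr(exp[:mid])
-- ===== Notes on version B (the rewrite author's own statement) =====
-- stated objective: alternative
-- what changed: Replaces A's linear loop over reversed(exp) with accumulator and branch chain by divide-and-conquer: split the forward string in half, recurse on each half, and concatenate the transformed right half before the left; the reversal emerges from the swap of halves, with the table-driven paren swap and space drop only at the single-character base case.
import Mathlib
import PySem

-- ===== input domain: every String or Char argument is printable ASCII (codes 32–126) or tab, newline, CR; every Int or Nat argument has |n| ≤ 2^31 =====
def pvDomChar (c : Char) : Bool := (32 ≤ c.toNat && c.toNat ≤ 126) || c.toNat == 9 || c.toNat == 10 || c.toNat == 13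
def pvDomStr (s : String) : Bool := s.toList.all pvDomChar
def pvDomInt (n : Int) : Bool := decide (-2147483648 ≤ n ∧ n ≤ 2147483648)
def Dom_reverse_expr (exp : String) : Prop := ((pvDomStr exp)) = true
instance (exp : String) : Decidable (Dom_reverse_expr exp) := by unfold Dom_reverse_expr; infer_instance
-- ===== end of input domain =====

-- B replaces A's loop over reversed(exp) with an accumulator by divide-and-conquer on the
-- forward string: recurse on the two halves and concatenate the right half's result first;
-- the paren swap / space drop happens only at the single-character base case (alternative, not faster).

-- ===== PORT A =====
-- literal port of A: loop over reversed(exp), building the result by concatenation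
def reverse_expr (exp : String) : String :=
  String.ofList (exp.toList.reverse.foldl (fun res c =>
    if c == ' ' then res
    else if c == ')' then res ++ ['(']
    else if c == '(' then res ++ [')']
    else res ++ [c]) [])

-- ===== PORT B =====
-- Source B's divide-and-conquer: empty -> "", one char -> space dropped / table-mapped
-- ({'(': ')', ')': '('}.get(exp, exp)), else recurse on the two halves (mid = len//2)
-- and put the transformed right half first.
def pvDnC : List Char → List Char
  | [] => []
  | [c] =>
      if c == ' ' then []
      else [PySem.Dict.getD (PySem.Dict.ofList [('(', ')'), (')', '(')]) c c]
  | a :: b :: rest =>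
      let l := a :: b :: rest
      pvDnC (l.drop (l.length / 2)) ++ pvDnC (l.take (l.length / 2))
  termination_by l => l.length
  decreasing_by all_goals (simp [List.length_drop, List.length_take]; omega)

def reverse_expr_alt (exp : String) : String :=
  String.ofList (pvDnC exp.toList)

-- ===== PRECONDITION & SPEC =====
def Spec_reverse_expr (exp : String) (out : String) : Prop := out = reverse_expr_alt exp
instance (exp : String) (out : String) : Decidable (Spec_reverse_expr exp out) := by unfold Spec_reverse_expr; infer_instance

-- ===== CLAIM =====
def Claim_equal_reverse_expr : Prop := ∀ (exp : String), Dom_reverse_expr exp → Spec_reverse_expr exp (reverse_expr exp)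

-- ===== LEMMAS AND PROOFS =====
def pvSwapParen (c : Char) : Char :=
  if c == '(' then ')' else if c == ')' then '(' else c

theorem reverse_expr_foldl (l : List Char) (acc : List Char) :
    l.foldl (fun res c =>
      if c == ' ' then res
      else if c == ')' then res ++ ['(']
      else if c == '(' then res ++ [')']
      else res ++ [c]) acc
    = acc ++ (l.filter (fun c => c != ' ')).map pvSwapParen := by
  induction l generalizing acc with
  | nil => simp
  | cons c l ih =>
    rw [List.foldl_cons, ih]
    by_cases h1 : c = ' '
    · subst h1; simp
    · by_cases h2 : c = ')'
      · subst h2; simp [pvSwapParen]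
      · by_cases h3 : c = '('
        · subst h3; simp [pvSwapParen]
        · simp [pvSwapParen, h1, h2, h3]

theorem pvDnC_single (c : Char) (h : ¬ c = ' ') :
    pvDnC [c] = [pvSwapParen c] := by
  by_cases h2 : c = '('
  · subst h2; simp [pvDnC, pvSwapParen, PySem.Dict.getD, PySem.Dict.ofList,
        PySem.Dict.empty, PySem.Dict.update, PySem.Dict.insert, PySem.Dict.get?]
  · by_cases h3 : c = ')'
    · subst h3; simp [pvDnC, pvSwapParen, PySem.Dict.getD, PySem.Dict.ofList,
        PySem.Dict.empty, PySem.Dict.update, PySem.Dict.insert, PySem.Dict.get?, List.find?]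
    · have e2 : ('(' == c) = false := by simp [Ne.symm h2]
      have e3 : (')' == c) = false := by simp [Ne.symm h3]
      simp [pvDnC, pvSwapParen, h, h2, h3, PySem.Dict.getD, PySem.Dict.ofList,
        PySem.Dict.empty, PySem.Dict.update, PySem.Dict.insert, PySem.Dict.get?,
        List.find?, e2, e3]

theorem pvDnC_eq (l : List Char) :
    pvDnC l = ((l.filter (fun c => c != ' ')).map pvSwapParen).reverse := by
  induction l using pvDnC.induct with
  | case1 => simp [pvDnC]
  | case2 c h =>
    have : c = ' ' := by simpa using h
    subst this; simp [pvDnC]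
  | case3 c h =>
    have hne : ¬ c = ' ' := by simpa using h
    rw [pvDnC_single c hne]
    simp [hne]
  | case4 a b rest l ih1 ih2 =>
    simp only [pvDnC]
    rw [ih1, ih2]
    conv_rhs => rw [← List.take_append_drop ((a :: b :: rest).length / 2) (a :: b :: rest)]
    rw [List.filter_append, List.map_append, List.reverse_append]

-- ===== VERDICT =====
theorem reverse_expr_spec : Claim_equal_reverse_expr := by
  intro exp _
  unfold Spec_reverse_expr reverse_expr reverse_expr_alt
  rw [reverse_expr_foldl, pvDnC_eq]
  simp [List.filter_reverse, List.map_reverse]
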